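-- pv_equiv track=rewrite | github.com/BigBenlau/PitchBook_project | part4_analyse_token_to_company/2_collect_official_evidence.py | select_top_paragraphs
-- ===== SOURCE A (Python) =====
-- from typing import Iterable
--
-- SIGNAL_PATTERNS = [
--     "founder",
--     "co-founder",
--     "founded by",
--     "created by",
--     "invented by",
--     "launched by",
--     "issued by",
--     "developed by",
--     "operated by",
--     "maintained by",
--     "foundation",
--     "labs",
--     "dao",
--     "association",
--     "issuer",
--     "parent company",
-- ]
--
-- def paragraph_keyword_hits(text: str) -> list[str]:
--     lowered = text.lower()
--     return [pattern for pattern in SIGNAL_PATTERNS if pattern in lowered]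
--
-- def select_top_paragraphs(paragraphs: Iterable[str], max_paragraphs: int) -> list[tuple[str, list[str]]]:
--     scored: list[tuple[int, int, str, list[str]]] = []
--     for paragraph in paragraphs:
--         hits = paragraph_keyword_hits(paragraph)
--         if not hits:
--             continue
--         score = len(hits)
--         scored.append((score, len(paragraph), paragraph, hits))
--     scored.sort(key=lambda item: (-item[0], -item[1], item[2]))
--
--     selected: list[tuple[str, list[str]]] = []
--     seen_texts: set[str] = set()
--     for _, _, paragraph, hits in scored:
--         key = paragraph.lower()
--         if key in seen_texts:
--             continue
--         seen_texts.add(key)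
--         selected.append((paragraph, hits))
--         if len(selected) >= max_paragraphs:
--             break
--     return selected
-- ===== SOURCE B (Python) =====
-- SIGNAL_PATTERNS = [
--     "founder",
--     "co-founder",
--     "founded by",
--     "created by",
--     "invented by",
--     "launched by",
--     "issued by",
--     "developed by",
--     "operated by",
--     "maintained by",
--     "foundation",
--     "labs",
--     "dao",
--     "association",
--     "issuer",
--     "parent company",
-- ]
--
--
-- def select_top_paragraphs(paragraphs, max_paragraphs):
--     # One pass: per lowercased text keep the scored entry whose original string
--     # is lexicographically smallest, then sort the distinct entries and slice.
--     best = {}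
--     for paragraph in paragraphs:
--         lowered = paragraph.lower()
--         hits = [pattern for pattern in SIGNAL_PATTERNS if pattern in lowered]
--         if not hits:
--             continue
--         cur = best.get(lowered)
--         if cur is None or paragraph < cur[2]:
--             cur = (len(hits), len(paragraph), paragraph, hits)
--         best[lowered] = cur
--     ordered = sorted(best.values(), key=lambda item: (-item[0], -item[1], item[2]))
--     return [(paragraph, hits) for _, _, paragraph, hits in ordered[:max_paragraphs]]
-- ===== Notes on version B (the rewrite author's own statement) =====
-- stated objective: alternative
-- what changed: Replaces filter-everything + sort-all + seen-set dedup loop with break by a single-pass dict keyed on the lowercased paragraph keeping the lexicographically smallest original per key, then sorts only the distinct representatives and slices; Pre_ excludes non-positive max_paragraphs, outside the natural domain of a top-k selection, where A's append-before-break still returns one element.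
-- outside the precondition, e.g. on select_top_paragraphs(['founder'], 0): A returns [('founder', ['founder'])], B returns []
import Mathlib
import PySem

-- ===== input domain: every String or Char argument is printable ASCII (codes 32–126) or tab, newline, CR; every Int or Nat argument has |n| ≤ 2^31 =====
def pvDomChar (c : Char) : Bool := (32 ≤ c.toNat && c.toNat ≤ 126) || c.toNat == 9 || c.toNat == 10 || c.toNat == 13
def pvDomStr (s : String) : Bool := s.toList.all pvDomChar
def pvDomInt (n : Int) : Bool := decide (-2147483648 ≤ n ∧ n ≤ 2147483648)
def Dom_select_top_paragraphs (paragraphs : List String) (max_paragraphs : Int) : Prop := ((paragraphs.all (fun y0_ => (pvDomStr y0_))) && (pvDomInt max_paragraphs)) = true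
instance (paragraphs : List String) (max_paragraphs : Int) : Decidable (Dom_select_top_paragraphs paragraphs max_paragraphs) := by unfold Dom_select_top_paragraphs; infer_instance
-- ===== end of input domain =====

-- B replaces A's filter + sort-everything + seen-set dedup loop by a single-pass dict keyed on the
-- lowercased paragraph (keeping the lexicographically smallest original per key), then sorts only the
-- distinct representatives and slices; alternative decomposition, same results on positive counts.

-- ===== PORT A =====

def SIGNAL_PATTERNS : List String :=
  ["founder", "co-founder", "founded by", "created by", "invented by", "launched by",
   "issued by", "developed by", "operated by", "maintained by", "foundation", "labs",
   "dao", "association", "issuer", "parent company"]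

def paragraph_keyword_hits (text : String) : List String :=
  let lowered := PySem.Str.lower text
  SIGNAL_PATTERNS.filter (fun pattern => PySem.Str.isIn pattern lowered)

-- Python's sort key (-score, -len, paragraph): a lexicographic triple.
def pvKeyA (item : Int × Int × String × List String) : Int ×ₗ Int ×ₗ String :=
  toLex (-item.1, toLex (-item.2.1, item.2.2.1))

-- the 'for … in scored: … break' selection loop of A
def pvLoopA (max_paragraphs : Int) :
    List (Int × Int × String × List String) → List (String × List String) → PySem.Set String →
    List (String × List String)
  | [], selected, _ => selected
  | item :: rest, selected, seen =>
    let key := PySem.Str.lower item.2.2.1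
    if PySem.Set.contains seen key then pvLoopA max_paragraphs rest selected seen
    else
      let selected' := selected ++ [(item.2.2.1, item.2.2.2)]
      if max_paragraphs ≤ (selected'.length : Int) then selected'
      else pvLoopA max_paragraphs rest selected' (PySem.Set.add seen key)

def select_top_paragraphs (paragraphs : List String) (max_paragraphs : Int) :
    List (String × List String) :=
  let scored := paragraphs.foldl (fun scored paragraph =>
    let hits := paragraph_keyword_hits paragraph
    if hits = [] then scored
    else scored ++ [((hits.length : Int), PySem.Str.len paragraph, paragraph, hits)]) []
  let ssorted := PySem.List.sorted scored pvKeyA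
  pvLoopA max_paragraphs ssorted [] PySem.Set.empty

-- ===== PORT B =====

def select_top_paragraphs_alt (paragraphs : List String) (max_paragraphs : Int) :
    List (String × List String) :=
  let best := paragraphs.foldl
    (fun (best : PySem.Dict String (Int × Int × String × List String)) paragraph =>
      let lowered := PySem.Str.lower paragraph
      let hits := SIGNAL_PATTERNS.filter (fun pattern => PySem.Str.isIn pattern lowered)
      if hits = [] then best
      else
        let cur := match best.get? lowered with
          | none => ((hits.length : Int), PySem.Str.len paragraph, paragraph, hits)
          | some cur =>
            if paragraph < cur.2.2.1 then ((hits.length : Int), PySem.Str.len paragraph, paragraph, hits)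
            else cur
        best.insert lowered cur)
    PySem.Dict.empty
  let ordered := PySem.List.sorted best.values pvKeyA
  (PySem.List.slice ordered none (some max_paragraphs)).map (fun item => (item.2.2.1, item.2.2.2))

-- ===== PRECONDITION & SPEC =====

-- Pre_ excludes non-positive max_paragraphs — outside the natural domain of a top-k selection —
-- where A's append-before-break quirk still returns one element while B's plain slice does not.
def Pre_select_top_paragraphs (paragraphs : List String) (max_paragraphs : Int) : Prop :=
  1 ≤ max_paragraphs

instance (paragraphs : List String) (max_paragraphs : Int) :
    Decidable (Pre_select_top_paragraphs paragraphs max_paragraphs) := by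
  unfold Pre_select_top_paragraphs; infer_instance

def pvWitness_select_top_paragraphs : List String × Int := (["a founder", "labs news"], 2)

def Spec_select_top_paragraphs (paragraphs : List String) (max_paragraphs : Int)
    (out : List (String × List String)) : Prop :=
  out = select_top_paragraphs_alt paragraphs max_paragraphs

instance (paragraphs : List String) (max_paragraphs : Int) (out : List (String × List String)) :
    Decidable (Spec_select_top_paragraphs paragraphs max_paragraphs out) := by
  unfold Spec_select_top_paragraphs; infer_instance

-- ===== CLAIM =====

def Claim_equal_select_top_paragraphs : Prop :=
  ∀ (paragraphs : List String) (max_paragraphs : Int),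
    Dom_select_top_paragraphs paragraphs max_paragraphs →
    Pre_select_top_paragraphs paragraphs max_paragraphs →
    Spec_select_top_paragraphs paragraphs max_paragraphs
      (select_top_paragraphs paragraphs max_paragraphs)

-- ===== LEMMAS AND PROOFS =====

-- abbreviations used only by the proofs
def pvLow (p : String) : String := PySem.Str.lower p

def pvEntry (p : String) : Int × Int × String × List String :=
  ((paragraph_keyword_hits p).length, PySem.Str.len p, p, paragraph_keyword_hits p)

def pvHas (p : String) : Bool := !decide (paragraph_keyword_hits p = [])

def pvUpd (d : PySem.Dict String (Int × Int × String × List String)) (p : String) :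
    Int × Int × String × List String :=
  match d.get? (pvLow p) with
  | none => pvEntry p
  | some cur => if p < cur.2.2.1 then pvEntry p else cur

def pvComb (o : Option (Int × Int × String × List String)) (p : String) :
    Int × Int × String × List String :=
  match o with
  | none => pvEntry p
  | some cur => if p < cur.2.2.1 then pvEntry p else cur

def pvCand (l : List String) (k : String) : List String := l.filter (fun p => pvLow p == k)

def pvDedup : List (Int × Int × String × List String) → PySem.Set String →
    List (Int × Int × String × List String)
  | [], _ => []
  | e :: r, s =>
    if PySem.Set.contains s (pvLow e.2.2.1) then pvDedup r s
    else e :: pvDedup r (PySem.Set.add s (pvLow e.2.2.1))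

def pvCnt (x : Int) : Nat := if 1 ≤ x then x.toNat else 1

theorem pv_scored_eq (l : List String) :
    l.foldl (fun scored paragraph =>
      let hits := paragraph_keyword_hits paragraph
      if hits = [] then scored
      else scored ++ [((hits.length : Int), PySem.Str.len paragraph, paragraph, hits)]) [] =
    (l.filter pvHas).map pvEntry := by
  have h : (fun (scored : List (Int × Int × String × List String)) paragraph =>
      let hits := paragraph_keyword_hits paragraph
      if hits = [] then scored
      else scored ++ [((hits.length : Int), PySem.Str.len paragraph, paragraph, hits)]) =
      (fun acc x => if pvHas x then acc ++ [pvEntry x] else acc) := by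
    funext acc x
    by_cases hx : paragraph_keyword_hits x = [] <;> simp [hx, pvHas, pvEntry]
  rw [h, PySem.List.foldl_append_if]
  simp

theorem pv_best_eq (l : List String) :
    l.foldl
      (fun (best : PySem.Dict String (Int × Int × String × List String)) paragraph =>
        let lowered := PySem.Str.lower paragraph
        let hits := SIGNAL_PATTERNS.filter (fun pattern => PySem.Str.isIn pattern lowered)
        if hits = [] then best
        else
          let cur := match best.get? lowered with
            | none => ((hits.length : Int), PySem.Str.len paragraph, paragraph, hits)
            | some cur =>
              if paragraph < cur.2.2.1 then ((hits.length : Int), PySem.Str.len paragraph, paragraph, hits)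
              else cur
          best.insert lowered cur)
      PySem.Dict.empty =
    (l.filter pvHas).foldl (fun d p => d.insert (pvLow p) (pvUpd d p)) PySem.Dict.empty := by
  have h : (fun (best : PySem.Dict String (Int × Int × String × List String)) paragraph =>
      let lowered := PySem.Str.lower paragraph
      let hits := SIGNAL_PATTERNS.filter (fun pattern => PySem.Str.isIn pattern lowered)
      if hits = [] then best
      else
        let cur := match best.get? lowered with
          | none => ((hits.length : Int), PySem.Str.len paragraph, paragraph, hits)
          | some cur =>
            if paragraph < cur.2.2.1 then ((hits.length : Int), PySem.Str.len paragraph, paragraph, hits)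
            else cur
        best.insert lowered cur) =
      (fun d p => if pvHas p then d.insert (pvLow p) (pvUpd d p) else d) := by
    funext d p
    change (if paragraph_keyword_hits p = [] then d else d.insert (pvLow p) (pvUpd d p)) =
      (if pvHas p then d.insert (pvLow p) (pvUpd d p) else d)
    by_cases hx : paragraph_keyword_hits p = [] <;> simp [hx, pvHas]
  rw [h, PySem.List.foldl_if_eq_foldl_filter]

theorem pv_get_fold (l : List String) (d : PySem.Dict String (Int × Int × String × List String))
    (k : String) :
    (l.foldl (fun d p => d.insert (pvLow p) (pvUpd d p)) d).get? k =
    l.foldl (fun o p => if pvLow p = k then some (pvComb o p) else o) (d.get? k) := by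
  induction l generalizing d with
  | nil => simp
  | cons p r ih =>
    simp only [List.foldl_cons]
    rw [ih]
    congr 1
    rw [PySem.Dict.get?_insert]
    by_cases hk : pvLow p = k
    · subst hk
      rw [if_pos rfl, if_pos rfl]
      rfl
    · rw [if_neg (Ne.symm hk), if_neg hk]

theorem pv_optfold_some (l : List String) (k : String) (p0 : String) :
    l.foldl (fun o p => if pvLow p = k then some (pvComb o p) else o) (some (pvEntry p0)) =
    some (pvEntry ((pvCand l k).foldl min p0)) := by
  induction l generalizing p0 with
  | nil => simp [pvCand]
  | cons p r ih =>
    simp only [List.foldl_cons]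
    by_cases hk : pvLow p = k
    · rw [if_pos hk]
      have hcomb : pvComb (some (pvEntry p0)) p = pvEntry (min p0 p) := by
        by_cases hlt : p < p0
        · simp [pvComb, pvEntry, hlt, min_eq_right hlt.le]
        · simp [pvComb, pvEntry, hlt, min_eq_left (not_lt.mp hlt)]
      rw [hcomb, ih]
      have hcand : pvCand (p :: r) k = p :: pvCand r k := by simp [pvCand, hk]
      rw [hcand, List.foldl_cons]
    · rw [if_neg hk, ih]
      have hcand : pvCand (p :: r) k = pvCand r k := by simp [pvCand, hk]
      rw [hcand]

theorem pv_optfold_none (l : List String) (k : String) :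
    l.foldl (fun o p => if pvLow p = k then some (pvComb o p) else o) none =
    match pvCand l k with
    | [] => none
    | c :: cs => some (pvEntry (cs.foldl min c)) := by
  induction l with
  | nil => simp [pvCand]
  | cons p r ih =>
    simp only [List.foldl_cons]
    by_cases hk : pvLow p = k
    · rw [if_pos hk]
      have : pvComb none p = pvEntry p := rfl
      rw [this, pv_optfold_some]
      simp [pvCand, hk]
    · rw [if_neg hk, ih]
      have hcand : pvCand (p :: r) k = pvCand r k := by simp [pvCand, hk]
      rw [hcand]

theorem pv_loopA_eq (m : Int) (l : List (Int × Int × String × List String))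
    (sel : List (String × List String)) (seen : PySem.Set String) :
    pvLoopA m l sel seen =
    sel ++ ((pvDedup l seen).map (fun e => (e.2.2.1, e.2.2.2))).take (pvCnt (m - sel.length)) := by
  induction l generalizing sel seen with
  | nil => simp [pvLoopA, pvDedup]
  | cons e r ih =>
    by_cases hc : PySem.Set.contains seen (pvLow e.2.2.1)
    · show (if PySem.Set.contains seen (pvLow e.2.2.1) then pvLoopA m r sel seen else _) = _
      rw [if_pos hc]
      show _ = sel ++ ((if PySem.Set.contains seen (pvLow e.2.2.1) then pvDedup r seen
        else e :: pvDedup r (PySem.Set.add seen (pvLow e.2.2.1))).map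
          (fun e => (e.2.2.1, e.2.2.2))).take (pvCnt (m - sel.length))
      rw [if_pos hc]
      exact ih sel seen
    · show (if PySem.Set.contains seen (pvLow e.2.2.1) then _
        else if m ≤ ((sel ++ [(e.2.2.1, e.2.2.2)]).length : Int) then sel ++ [(e.2.2.1, e.2.2.2)]
        else pvLoopA m r (sel ++ [(e.2.2.1, e.2.2.2)]) (PySem.Set.add seen (pvLow e.2.2.1))) = _
      rw [if_neg hc]
      show _ = sel ++ ((if PySem.Set.contains seen (pvLow e.2.2.1) then pvDedup r seen
        else e :: pvDedup r (PySem.Set.add seen (pvLow e.2.2.1))).map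
          (fun e => (e.2.2.1, e.2.2.2))).take (pvCnt (m - sel.length))
      rw [if_neg hc]
      by_cases hm : m ≤ ((sel ++ [(e.2.2.1, e.2.2.2)]).length : Int)
      · rw [if_pos hm]
        have hcnt : pvCnt (m - sel.length) = 1 := by
          simp only [List.length_append, List.length_cons, List.length_nil] at hm
          unfold pvCnt
          split_ifs with h1 <;> omega
        rw [hcnt]
        simp
      · rw [if_neg hm, ih]
        have hcnt : pvCnt (m - sel.length) = pvCnt (m - ((sel ++ [(e.2.2.1, e.2.2.2)]).length : Int)) + 1 := by
          simp only [List.length_append, List.length_cons, List.length_nil] at hm ⊢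
          unfold pvCnt
          split_ifs with h1 h2 h2 <;> omega
        rw [hcnt]
        simp [List.take_succ_cons]

theorem pv_mem_dedup_iff (l : List (Int × Int × String × List String)) (s : PySem.Set String)
    (e : Int × Int × String × List String) :
    e ∈ pvDedup l s ↔
      PySem.Set.contains s (pvLow e.2.2.1) = false ∧
      l.find? (fun x => pvLow x.2.2.1 == pvLow e.2.2.1) = some e := by
  induction l generalizing s with
  | nil => simp [pvDedup]
  | cons a r ih =>
    show e ∈ (if PySem.Set.contains s (pvLow a.2.2.1) then pvDedup r s
      else a :: pvDedup r (PySem.Set.add s (pvLow a.2.2.1))) ↔ _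
    by_cases hc : PySem.Set.contains s (pvLow a.2.2.1)
    · rw [if_pos hc, ih]
      by_cases hk : pvLow a.2.2.1 = pvLow e.2.2.1
      · rw [List.find?_cons_of_pos (p := fun (x : Int × Int × String × List String) => pvLow x.2.2.1 == pvLow e.2.2.1) (by simp [hk])]
        constructor
        · rintro ⟨h1, h2⟩
          rw [← hk] at h1
          rw [hc] at h1
          exact absurd h1 (by simp)
        · rintro ⟨h1, h2⟩
          injection h2 with h2
          subst h2
          rw [hc] at h1
          exact absurd h1 (by simp)
      · rw [List.find?_cons_of_neg (p := fun (x : Int × Int × String × List String) => pvLow x.2.2.1 == pvLow e.2.2.1) (by simp [hk])]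
    · rw [if_neg hc]
      simp only [List.mem_cons]
      by_cases hk : pvLow a.2.2.1 = pvLow e.2.2.1
      · rw [List.find?_cons_of_pos (p := fun (x : Int × Int × String × List String) => pvLow x.2.2.1 == pvLow e.2.2.1) (by simp [hk]), ih]
        constructor
        · rintro (rfl | ⟨h1, h2⟩)
          · exact ⟨by rw [← hk]; exact Bool.eq_false_iff.mpr hc, rfl⟩
          · rw [Bool.eq_false_iff, Ne, PySem.Set.contains_iff, PySem.Set.mem_add] at h1
            exact absurd (Or.inr hk.symm) h1
        · rintro ⟨h1, h2⟩
          injection h2 with h2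
          exact Or.inl h2.symm
      · rw [List.find?_cons_of_neg (p := fun (x : Int × Int × String × List String) => pvLow x.2.2.1 == pvLow e.2.2.1) (by simp [hk]), ih]
        have hadd : PySem.Set.contains (PySem.Set.add s (pvLow a.2.2.1)) (pvLow e.2.2.1) = false ↔
            PySem.Set.contains s (pvLow e.2.2.1) = false := by
          simp only [Bool.eq_false_iff, Ne, PySem.Set.contains_iff, PySem.Set.mem_add]
          constructor
          · intro h hmem
            exact h (Or.inl hmem)
          · rintro h (hmem | heq)
            · exact h hmem
            · exact hk heq.symm
        constructor
        · rintro (rfl | ⟨h1, h2⟩)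
          · exact absurd rfl hk
          · exact ⟨hadd.mp h1, h2⟩
        · rintro ⟨h1, h2⟩
          exact Or.inr ⟨hadd.mpr h1, h2⟩

theorem pv_dedup_sublist (l : List (Int × Int × String × List String)) (s : PySem.Set String) :
    (pvDedup l s).Sublist l := by
  induction l generalizing s with
  | nil => simp [pvDedup]
  | cons e r ih =>
    rw [pvDedup]
    split
    · exact (ih s).cons e
    · exact (ih _).cons₂ e

theorem pv_dedup_pairwise_key (l : List (Int × Int × String × List String)) (s : PySem.Set String) :
    (pvDedup l s).Pairwise (fun a b => pvLow a.2.2.1 ≠ pvLow b.2.2.1) := by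
  induction l generalizing s with
  | nil => simp [pvDedup]
  | cons a r ih =>
    show List.Pairwise _ (if PySem.Set.contains s (pvLow a.2.2.1) then pvDedup r s
      else a :: pvDedup r (PySem.Set.add s (pvLow a.2.2.1)))
    by_cases hc : PySem.Set.contains s (pvLow a.2.2.1)
    · rw [if_pos hc]
      exact ih s
    · rw [if_neg hc]
      refine List.Pairwise.cons ?_ (ih _)
      intro b hb
      have := ((pv_mem_dedup_iff r _ b).mp hb).1
      rw [Bool.eq_false_iff, Ne, PySem.Set.contains_iff, PySem.Set.mem_add] at this
      intro heq
      exact this (Or.inr heq.symm)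

theorem pv_low_hits {p q : String} (h : pvLow p = pvLow q) :
    paragraph_keyword_hits p = paragraph_keyword_hits q := by
  unfold paragraph_keyword_hits
  unfold pvLow at h
  rw [h]

theorem pv_low_len {p q : String} (h : pvLow p = pvLow q) :
    PySem.Str.len p = PySem.Str.len q := by
  have h2 := congrArg String.toList h
  simp [pvLow, PySem.Str.toList_lower] at h2
  have h3 := congrArg List.length h2
  simp [PySem.Chars.lower] at h3
  simp [PySem.Str.len, h3]

theorem pv_keyA_le_iff {p q : String} (h : pvLow p = pvLow q) :
    (pvKeyA (pvEntry p) ≤ pvKeyA (pvEntry q)) ↔ p ≤ q := by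
  unfold pvKeyA pvEntry
  rw [pv_low_hits h, pv_low_len h]
  simp [Prod.Lex.le_iff]

theorem pv_keyA_eq_third {e e' : Int × Int × String × List String}
    (h : pvKeyA e = pvKeyA e') : e.2.2.1 = e'.2.2.1 := by
  unfold pvKeyA at h
  rw [toLex_inj, Prod.ext_iff] at h
  obtain ⟨-, h2⟩ := h
  rw [toLex_inj, Prod.ext_iff] at h2
  exact h2.2

-- the common characterisation: the minimal representative of each lowercase class
def pvP (l : List String) (e : Int × Int × String × List String) : Prop :=
  e.2.2.1 ∈ l.filter pvHas ∧ e = pvEntry e.2.2.1 ∧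
  ∀ q ∈ l.filter pvHas, pvLow q = pvLow e.2.2.1 → e.2.2.1 ≤ q

theorem pv_cand_mem {l : List String} {k q : String} :
    q ∈ pvCand l k ↔ q ∈ l ∧ pvLow q = k := by
  simp [pvCand]

theorem pv_getD_min (l : List String) (k : String)
    (hk : k ∈ (l.filter pvHas).map pvLow) :
    ∃ m, m ∈ l.filter pvHas ∧ pvLow m = k ∧
      ((l.filter pvHas).foldl (fun d p => d.insert (pvLow p) (pvUpd d p))
        PySem.Dict.empty).get? k = some (pvEntry m) ∧
      ∀ q ∈ l.filter pvHas, pvLow q = k → m ≤ q := by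
  rw [pv_get_fold, PySem.Dict.get?_empty, pv_optfold_none]
  obtain ⟨p, hp, hpl⟩ := List.mem_map.mp hk
  have hpc : p ∈ pvCand (l.filter pvHas) k := pv_cand_mem.mpr ⟨hp, hpl⟩
  cases hc : pvCand (l.filter pvHas) k with
  | nil => rw [hc] at hpc; exact absurd hpc (List.not_mem_nil)
  | cons c cs =>
    refine ⟨cs.foldl min c, ?_, ?_, rfl, ?_⟩
    · have hm : cs.foldl min c ∈ pvCand (l.filter pvHas) k := by
        rw [hc]
        rcases PySem.List.foldl_min_mem cs c with h | h
        · rw [h]; exact List.mem_cons_self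
        · exact List.mem_cons_of_mem c h
      exact (pv_cand_mem.mp hm).1
    · have hm : cs.foldl min c ∈ pvCand (l.filter pvHas) k := by
        rw [hc]
        rcases PySem.List.foldl_min_mem cs c with h | h
        · rw [h]; exact List.mem_cons_self
        · exact List.mem_cons_of_mem c h
      exact (pv_cand_mem.mp hm).2
    · intro q hq hql
      have : q ∈ pvCand (l.filter pvHas) k := pv_cand_mem.mpr ⟨hq, hql⟩
      rw [hc] at this
      rcases List.mem_cons.mp this with rfl | h
      · exact (PySem.List.foldl_min_le cs q).1
      · exact (PySem.List.foldl_min_le cs c).2 q h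

theorem pv_mem_values_iff (l : List String) (e : Int × Int × String × List String) :
    e ∈ ((l.filter pvHas).foldl (fun d p => d.insert (pvLow p) (pvUpd d p)) PySem.Dict.empty).values
      ↔ pvP l e := by
  have hnodup : ((l.filter pvHas).foldl (fun d p => d.insert (pvLow p) (pvUpd d p))
      PySem.Dict.empty).keys.Nodup :=
    PySem.Dict.nodup_keys_foldl_insert_key _ _ _ _ PySem.Dict.nodup_keys_empty
  have hkeys : ((l.filter pvHas).foldl (fun d p => d.insert (pvLow p) (pvUpd d p))
      PySem.Dict.empty).keys = PySem.Set.ofList ((l.filter pvHas).map pvLow) := by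
    rw [PySem.Dict.keys_foldl_insert_key, PySem.Dict.keys_empty, PySem.Set.update_nil_left]
  rw [PySem.Dict.values_eq_map_keys _ hnodup (pvEntry "")]
  constructor
  · intro he
    obtain ⟨k, hkmem, hke⟩ := List.mem_map.mp he
    rw [hkeys] at hkmem
    have hkmem' : k ∈ (l.filter pvHas).map pvLow := (PySem.Set.mem_ofList _ _).mp hkmem
    obtain ⟨m, hm1, hm2, hm3, hm4⟩ := pv_getD_min l k hkmem'
    have hgd : ((l.filter pvHas).foldl (fun d p => d.insert (pvLow p) (pvUpd d p))
        PySem.Dict.empty).getD k (pvEntry "") = pvEntry m := by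
      rw [PySem.Dict.getD_eq_get?_getD, hm3]; rfl
    rw [hgd] at hke
    subst hke
    exact ⟨hm1, rfl, fun q hq hql => hm4 q hq (by rw [hql]; exact hm2)⟩
  · rintro ⟨hp, he, hmin⟩
    have hkmem' : pvLow e.2.2.1 ∈ (l.filter pvHas).map pvLow := List.mem_map.mpr ⟨e.2.2.1, hp, rfl⟩
    obtain ⟨m, hm1, hm2, hm3, hm4⟩ := pv_getD_min l (pvLow e.2.2.1) hkmem'
    have hme : m = e.2.2.1 :=
      le_antisymm (hm4 e.2.2.1 hp rfl) (hmin m hm1 hm2)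
    refine List.mem_map.mpr ⟨pvLow e.2.2.1, ?_, ?_⟩
    · rw [hkeys]; exact (PySem.Set.mem_ofList _ _).mpr hkmem'
    · rw [PySem.Dict.getD_eq_get?_getD, hm3, hme]
      exact he.symm

theorem pv_mem_dedup_sorted_iff (l : List String) (e : Int × Int × String × List String) :
    e ∈ pvDedup (PySem.List.sorted ((l.filter pvHas).map pvEntry) pvKeyA) PySem.Set.empty
      ↔ pvP l e := by
  rw [pv_mem_dedup_iff]
  have hempty : PySem.Set.contains PySem.Set.empty (pvLow e.2.2.1) = false := by
    simp [PySem.Set.empty]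
  constructor
  · rintro ⟨-, hf⟩
    obtain ⟨hpred, l1, l2, hsplit, hfail⟩ := List.find?_eq_some_iff_append.mp hf
    have hmem := List.mem_of_find?_eq_some hf
    rw [PySem.List.mem_sorted] at hmem
    obtain ⟨p, hp, hpe⟩ := List.mem_map.mp hmem
    subst hpe
    refine ⟨hp, rfl, ?_⟩
    intro q hq hql
    have hql' : pvLow q = pvLow p := hql
    have hqs : pvEntry q ∈ PySem.List.sorted ((l.filter pvHas).map pvEntry) pvKeyA :=
      (PySem.List.mem_sorted _ _ _ _).mpr (List.mem_map.mpr ⟨q, hq, rfl⟩)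
    rw [hsplit] at hqs
    show (pvEntry p).2.2.1 ≤ q
    rcases List.mem_append.mp hqs with h1 | h2
    · have hne := hfail _ h1
      simp only [Bool.not_eq_eq_eq_not, Bool.not_true, beq_eq_false_iff_ne] at hne
      exact absurd hql' hne
    · rcases List.mem_cons.mp h2 with heq | h3
      · have hq2 : q = p := congrArg (fun z => z.2.2.1) heq
        exact le_of_eq hq2.symm
      · have hpw := PySem.List.sorted_pairwise ((l.filter pvHas).map pvEntry) pvKeyA
        rw [hsplit] at hpw
        have hle : pvKeyA (pvEntry p) ≤ pvKeyA (pvEntry q) :=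
          (List.pairwise_cons.mp (List.pairwise_append.mp hpw).2.1).1 (pvEntry q) h3
        exact (pv_keyA_le_iff hql'.symm).mp hle
  · rintro ⟨hp, he, hmin⟩
    refine ⟨hempty, ?_⟩
    have hmem : e ∈ PySem.List.sorted ((l.filter pvHas).map pvEntry) pvKeyA :=
      (PySem.List.mem_sorted _ _ _ _).mpr (List.mem_map.mpr ⟨e.2.2.1, hp, he.symm⟩)
    have hsome : (List.find? (fun x => pvLow x.2.2.1 == pvLow e.2.2.1)
        (PySem.List.sorted ((l.filter pvHas).map pvEntry) pvKeyA)).isSome :=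
      List.find?_isSome.mpr ⟨e, hmem, by simp⟩
    obtain ⟨x, hx⟩ := Option.isSome_iff_exists.mp hsome
    obtain ⟨hpredx, l1, l2, hsplit, hfail⟩ := List.find?_eq_some_iff_append.mp hx
    have hxmem := List.mem_of_find?_eq_some hx
    rw [PySem.List.mem_sorted] at hxmem
    obtain ⟨r, hr, hre⟩ := List.mem_map.mp hxmem
    have hlow : pvLow x.2.2.1 = pvLow e.2.2.1 := by simpa using hpredx
    have hlow' : pvLow r = pvLow e.2.2.1 := by rw [← hre] at hlow; exact hlow
    have hpr : e.2.2.1 ≤ r := hmin r hr hlow'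
    suffices hxe : x = e by rw [hxe] at hx; exact hx
    rw [hsplit] at hmem
    rcases List.mem_append.mp hmem with h1 | h2
    · have hne := hfail _ h1
      simp at hne
    · rcases List.mem_cons.mp h2 with heq | h3
      · exact heq.symm
      · have hpw := PySem.List.sorted_pairwise ((l.filter pvHas).map pvEntry) pvKeyA
        rw [hsplit] at hpw
        have hle : pvKeyA x ≤ pvKeyA e := (List.pairwise_cons.mp (List.pairwise_append.mp hpw).2.1).1 e h3
        rw [← hre, he] at hle
        have hrle : r ≤ e.2.2.1 := (pv_keyA_le_iff hlow').mp hle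
        have hreq : r = e.2.2.1 := le_antisymm hrle hpr
        rw [← hre, hreq, ← he]

theorem pv_core (l : List String) :
    PySem.List.sorted
      ((l.filter pvHas).foldl (fun d p => d.insert (pvLow p) (pvUpd d p)) PySem.Dict.empty).values
      pvKeyA =
    pvDedup (PySem.List.sorted ((l.filter pvHas).map pvEntry) pvKeyA) PySem.Set.empty := by
  have hnd_ded : (pvDedup (PySem.List.sorted ((l.filter pvHas).map pvEntry) pvKeyA)
      PySem.Set.empty).Nodup := by
    refine List.Pairwise.imp ?_ (pv_dedup_pairwise_key _ _)
    intro a b h heq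
    exact h (by rw [heq])
  have hnd_val : ((l.filter pvHas).foldl (fun d p => d.insert (pvLow p) (pvUpd d p))
      PySem.Dict.empty).values.Nodup := by
    have hnodup : ((l.filter pvHas).foldl (fun d p => d.insert (pvLow p) (pvUpd d p))
        PySem.Dict.empty).keys.Nodup :=
      PySem.Dict.nodup_keys_foldl_insert_key _ _ _ _ PySem.Dict.nodup_keys_empty
    have hkeys : ((l.filter pvHas).foldl (fun d p => d.insert (pvLow p) (pvUpd d p))
        PySem.Dict.empty).keys = PySem.Set.ofList ((l.filter pvHas).map pvLow) := by
      rw [PySem.Dict.keys_foldl_insert_key, PySem.Dict.keys_empty, PySem.Set.update_nil_left]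
    rw [PySem.Dict.values_eq_map_keys _ hnodup (pvEntry "")]
    refine List.Nodup.map_on ?_ hnodup
    intro x hx y hy hxy
    have hx' : x ∈ (l.filter pvHas).map pvLow := by
      rw [hkeys] at hx; exact (PySem.Set.mem_ofList _ _).mp hx
    have hy' : y ∈ (l.filter pvHas).map pvLow := by
      rw [hkeys] at hy; exact (PySem.Set.mem_ofList _ _).mp hy
    obtain ⟨mx, -, hmx2, hmx3, -⟩ := pv_getD_min l x hx'
    obtain ⟨my, -, hmy2, hmy3, -⟩ := pv_getD_min l y hy'
    rw [PySem.Dict.getD_eq_get?_getD, hmx3, PySem.Dict.getD_eq_get?_getD, hmy3] at hxy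
    simp only [Option.getD_some] at hxy
    have : mx = my := congrArg (fun z => z.2.2.1) hxy
    rw [← hmx2, ← hmy2, this]
  have hperm : (pvDedup (PySem.List.sorted ((l.filter pvHas).map pvEntry) pvKeyA)
      PySem.Set.empty).Perm
      ((l.filter pvHas).foldl (fun d p => d.insert (pvLow p) (pvUpd d p))
        PySem.Dict.empty).values :=
    (List.perm_ext_iff_of_nodup hnd_ded hnd_val).mpr
      (fun a => (pv_mem_dedup_sorted_iff l a).trans (pv_mem_values_iff l a).symm)
  have hle : (pvDedup (PySem.List.sorted ((l.filter pvHas).map pvEntry) pvKeyA)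
      PySem.Set.empty).Pairwise (fun a b => pvKeyA a ≤ pvKeyA b) :=
    List.Pairwise.sublist (pv_dedup_sublist _ _) (PySem.List.sorted_pairwise _ _)
  have hlt : (pvDedup (PySem.List.sorted ((l.filter pvHas).map pvEntry) pvKeyA)
      PySem.Set.empty).Pairwise (fun a b => pvKeyA a < pvKeyA b) := by
    refine List.Pairwise.imp ?_ (hle.and (pv_dedup_pairwise_key _ _))
    intro a b h
    exact lt_of_le_of_ne h.1 (fun heq => h.2 (by rw [pv_keyA_eq_third heq]))
  exact PySem.List.sorted_eq_of_perm_of_pairwise_lt _ _ _ hperm hlt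

-- ===== VERDICT =====

theorem select_top_paragraphs_spec : Claim_equal_select_top_paragraphs := by
  intro paragraphs max_paragraphs _ hpre
  unfold Spec_select_top_paragraphs
  simp only [select_top_paragraphs, select_top_paragraphs_alt, pv_scored_eq, pv_best_eq]
  rw [pv_loopA_eq, pv_core]
  simp only [List.length_nil, Nat.cast_zero, sub_zero, List.nil_append]
  have hm : 1 ≤ max_paragraphs := hpre
  have hlim : max_paragraphs = ((max_paragraphs.toNat : Nat) : Int) := by omega
  rw [hlim, PySem.List.slice_to_natCast]
  have hcnt : pvCnt ((max_paragraphs.toNat : Nat) : Int) = max_paragraphs.toNat := by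
    unfold pvCnt; split_ifs with h <;> omega
  rw [hcnt, List.map_take]
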